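-- pv_equiv track=rewrite | github.com/Twofootonion/maren | core/correlator.py | count_recurrences
-- ===== SOURCE A (Python) =====
-- from typing import Any
--
-- def count_recurrences(
--     action: dict[str, Any],
--     client_events: list[dict[str, Any]],
--     device_events: list[dict[str, Any]],
-- ) -> int:
--     """Count how many times this action's issue type recurred in event history.
--
--     Matches events whose ``type`` or ``reason`` field contains keywords from
--     the action's ``category`` or ``issue_type``.  This is a best-effort
--     heuristic — Mist event schemas vary by firmware and category.
--
--     Parameters
--     ----------
--     action : dict[str, Any]
--         Marvis Action object (must have at least ``category`` or
--         ``issue_type``).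
--     client_events : list[dict[str, Any]]
--         Client events from :func:`fetch_client_events`.
--     device_events : list[dict[str, Any]]
--         Device events from :func:`fetch_device_events`.
--
--     Returns
--     -------
--     int
--         Number of matching events in the lookback window.
--     """
--     # Build a set of lowercase keywords to match against event type/reason.
--     keywords: set[str] = set()
--     for field in ("category", "issue_type", "action_type"):
--         val = action.get(field, "")
--         if val:
--             keywords.update(val.lower().split("_"))
--             keywords.add(val.lower())
--
--     if not keywords:
--         return 0
--
--     count = 0
--     all_events = client_events + device_events
--     for event in all_events:
--         event_type = str(event.get("type", "") or event.get("reason", "")).lower()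
--         if any(kw in event_type for kw in keywords):
--             count += 1
--
--     return count
-- ===== SOURCE B (Python) =====
-- from typing import Any
--
--
-- def count_recurrences(
--     action: dict[str, Any],
--     client_events: list[dict[str, Any]],
--     device_events: list[dict[str, Any]],
-- ) -> int:
--     keywords: set[str] = set()
--     for field in ("category", "issue_type", "action_type"):
--         val = action.get(field, "")
--         if val:
--             keywords.update(val.lower().split("_"))
--             keywords.add(val.lower())
--
--     texts = [
--         str(event.get("type", "") or event.get("reason", "")).lower()
--         for event in client_events + device_events
--     ]
--
--     # Keyword-major: collect the set of event indices each keyword hits,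
--     # then count the distinct matched events.
--     matched: set[int] = set()
--     for kw in keywords:
--         matched.update(i for i, text in enumerate(texts) if kw in text)
--     return len(matched)
-- ===== Notes on version B (the rewrite author's own statement) =====
-- stated objective: alternative
-- what changed: The matching loop is inverted: instead of scanning each event and asking whether any keyword is a substring (with an early-exit any and a running counter), B precomputes the lowercased event texts, then loops keyword-major, unioning the set of event indices each keyword matches, and returns the size of that union; the now-redundant empty-keyword early return is dropped.
import Mathlib
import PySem

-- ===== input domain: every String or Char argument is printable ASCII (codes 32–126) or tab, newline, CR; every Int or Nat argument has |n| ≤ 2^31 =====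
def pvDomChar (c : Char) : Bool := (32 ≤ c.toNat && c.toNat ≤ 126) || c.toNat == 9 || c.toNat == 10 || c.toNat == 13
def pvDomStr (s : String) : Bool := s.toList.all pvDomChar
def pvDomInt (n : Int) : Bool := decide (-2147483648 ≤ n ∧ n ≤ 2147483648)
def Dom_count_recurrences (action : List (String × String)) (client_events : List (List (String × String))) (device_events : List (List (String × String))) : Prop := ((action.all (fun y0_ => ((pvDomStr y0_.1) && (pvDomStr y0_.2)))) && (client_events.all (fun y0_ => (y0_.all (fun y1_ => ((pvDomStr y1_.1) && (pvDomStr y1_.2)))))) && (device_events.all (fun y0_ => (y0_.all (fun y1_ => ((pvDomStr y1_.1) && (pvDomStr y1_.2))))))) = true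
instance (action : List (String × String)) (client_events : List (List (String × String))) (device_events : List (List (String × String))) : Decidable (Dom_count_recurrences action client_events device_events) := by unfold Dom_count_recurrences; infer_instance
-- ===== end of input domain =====

-- B inverts the matching loop: keyword-major over the event texts, collecting the set
-- of matched event indices and returning its size (alternative decomposition, same cost).

-- ===== PORT A =====
-- the event-type string both Pythons compute: str(event.get("type","") or event.get("reason","")).lower()
def pvEventType (event : List (String × String)) : String :=
  let t := PySem.Dict.getD (PySem.Dict.mk event) "type" ""
  PySem.Str.lower (if t ≠ "" then t else PySem.Dict.getD (PySem.Dict.mk event) "reason" "")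

-- keywords: set() built from the three action fields (shared verbatim by both Pythons)
def pvKeywords (action : List (String × String)) : PySem.Set String :=
  ["category", "issue_type", "action_type"].foldl (fun kws field =>
    let val := PySem.Dict.getD (PySem.Dict.mk action) field ""
    if val ≠ "" then
      PySem.Set.add (PySem.Set.update kws ((PySem.Str.split? (PySem.Str.lower val) "_").getD []))
        (PySem.Str.lower val)
    else kws) PySem.Set.empty

def count_recurrences (action : List (String × String)) (client_events : List (List (String × String))) (device_events : List (List (String × String))) : Int :=
  let keywords := pvKeywords action
  if keywords = [] then 0
  else
    let all_events := client_events ++ device_events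
    all_events.foldl (fun count event =>
      let event_type := pvEventType event
      if keywords.any (fun kw => PySem.Str.isIn kw event_type) then count + 1 else count) 0

-- ===== PORT B =====
def count_recurrences_alt (action : List (String × String)) (client_events : List (List (String × String))) (device_events : List (List (String × String))) : Int :=
  let keywords := pvKeywords action
  let texts := (client_events ++ device_events).map pvEventType
  -- for kw in keywords: matched.update(i for i, text in enumerate(texts) if kw in text)
  -- (a union of index sets: the result cannot depend on the set's iteration order)
  let matched : PySem.Set Int :=
    keywords.foldl (fun m kw =>
      PySem.Set.update m
        (((PySem.List.enumerate texts).filter (fun p => PySem.Str.isIn kw p.2)).map (fun p => p.1))) PySem.Set.empty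
  PySem.Set.len matched

-- ===== PRECONDITION & SPEC =====
def Spec_count_recurrences (action : List (String × String)) (client_events : List (List (String × String))) (device_events : List (List (String × String))) (out : Int) : Prop := out = count_recurrences_alt action client_events device_events
instance (action : List (String × String)) (client_events : List (List (String × String))) (device_events : List (List (String × String))) (out : Int) : Decidable (Spec_count_recurrences action client_events device_events out) := by unfold Spec_count_recurrences; infer_instance

-- ===== CLAIM (what is proved, stated in full; the proofs are below) =====
def Claim_equal_count_recurrences : Prop := ∀ (action : List (String × String)) (client_events : List (List (String × String))) (device_events : List (List (String × String))), Dom_count_recurrences action client_events device_events → Spec_count_recurrences action client_events device_events (count_recurrences action client_events device_events)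

-- ===== LEMMAS AND PROOFS =====

-- membership in B's fold of set-updates
lemma pv_mem_foldl_update {α β : Type} [BEq α] [LawfulBEq α] (g : β → List α) :
    ∀ (K : List β) (m : List α) (x : α),
      x ∈ K.foldl (fun m kw => PySem.Set.update m (g kw)) m ↔ x ∈ m ∨ ∃ kw ∈ K, x ∈ g kw := by
  intro K
  induction K with
  | nil => simp
  | cons k K ih =>
    intro m x
    simp only [List.foldl_cons, ih, PySem.Set.mem_update, List.mem_cons]
    constructor
    · rintro (⟨h | h⟩ | ⟨kw, hkw, hx⟩)
      · exact Or.inl h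
      · exact Or.inr ⟨k, Or.inl rfl, h⟩
      · exact Or.inr ⟨kw, Or.inr hkw, hx⟩
    · rintro (h | ⟨kw, (rfl | hkw), hx⟩)
      · exact Or.inl (Or.inl h)
      · exact Or.inl (Or.inr hx)
      · exact Or.inr ⟨kw, hkw, hx⟩

-- B's fold of set-updates keeps the set duplicate-free
lemma pv_nodup_foldl_update {α β : Type} [BEq α] [LawfulBEq α] (g : β → List α) :
    ∀ (K : List β) (m : List α), m.Nodup → (K.foldl (fun m kw => PySem.Set.update m (g kw)) m).Nodup := by
  intro K
  induction K with
  | nil => intro m hm; simpa using hm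
  | cons k K ih =>
    intro m hm
    exact ih _ (PySem.Set.nodup_update m (g k) hm)

-- counting over an enumeration by a predicate on the values
lemma pv_countP_enumerate {α : Type} (q : α → Bool) :
    ∀ (l : List α) (s : Int),
      (PySem.List.enumerate l s).countP (fun p => q p.2) = l.countP q := by
  intro l
  induction l with
  | nil => intro s; simp [PySem.List.enumerate_nil]
  | cons x xs ih =>
    intro s
    simp [PySem.List.enumerate_cons, List.countP_cons, ih]

-- the core identity: A's counting loop = the size of B's union of matched-index sets
lemma pv_main (K : PySem.Set String) (E : List (List (String × String))) :
    (if K = [] then (0 : Int)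
     else E.foldl (fun count event =>
       let event_type := pvEventType event
       if K.any (fun kw => PySem.Str.isIn kw event_type) then count + 1 else count) 0)
    = PySem.Set.len
        (K.foldl (fun m kw =>
          PySem.Set.update m
            ((((PySem.List.enumerate (E.map pvEventType)).filter (fun p => PySem.Str.isIn kw p.2))).map (fun p => p.1)))
          PySem.Set.empty) := by
  set texts := E.map pvEventType with htexts
  set pred : List (String × String) → Bool :=
    fun e => K.any (fun kw => PySem.Str.isIn kw (pvEventType e)) with hpred
  set matched : PySem.Set Int :=
    K.foldl (fun m kw =>
      PySem.Set.update m
        (((PySem.List.enumerate texts).filter (fun p => PySem.Str.isIn kw p.2)).map (fun p => p.1)))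
      PySem.Set.empty with hmatched
  set L := ((PySem.List.enumerate texts).filter (fun p => K.any (fun kw => PySem.Str.isIn kw p.2))).map
      (fun p => p.1) with hL
  have hLnodup : L.Nodup := by
    have h1 : ((PySem.List.enumerate texts).filter (fun p => K.any (fun kw => PySem.Str.isIn kw p.2))).Pairwise
        (fun p q => p.1 < q.1) :=
      List.Pairwise.filter _ (PySem.List.pairwise_lt_enumerate texts 0)
    exact (List.pairwise_map).mpr (h1.imp (fun h => ne_of_lt h))
  have hmem : ∀ x : Int, x ∈ matched ↔ x ∈ L := by
    intro x
    rw [hmatched, hL, pv_mem_foldl_update]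
    simp only [PySem.Set.empty, List.not_mem_nil, false_or, List.mem_map, List.mem_filter,
      List.any_eq_true]
    constructor
    · rintro ⟨kw, hkw, p, ⟨hp, hin⟩, rfl⟩
      exact ⟨p, ⟨hp, kw, hkw, hin⟩, rfl⟩
    · rintro ⟨p, ⟨hp, kw, hkw, hin⟩, rfl⟩
      exact ⟨kw, hkw, p, ⟨hp, hin⟩, rfl⟩
  have hnd : matched.Nodup := pv_nodup_foldl_update _ K PySem.Set.empty List.nodup_nil
  have hperm : matched.Perm L := (List.perm_ext_iff_of_nodup hnd hLnodup).mpr hmem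
  have hlen : matched.length = E.countP pred := by
    rw [hperm.length_eq, hL, List.length_map, ← List.countP_eq_length_filter,
      pv_countP_enumerate (fun t => K.any (fun kw => PySem.Str.isIn kw t)) texts 0,
      htexts, List.countP_map]
    rfl
  by_cases hke : K = []
  · rw [if_pos hke]
    have hm0 : matched = [] := by rw [hmatched, hke]; rfl
    rw [PySem.Set.len, hm0]
    rfl
  · rw [if_neg hke]
    have := PySem.List.foldl_if_add_one pred (l := E) (a := 0)
    simp only [hpred] at this
    rw [this, zero_add, PySem.Set.len, hlen]

-- ===== VERDICT (by name: the statement is the Claim_ definition above) =====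
theorem count_recurrences_spec : Claim_equal_count_recurrences := by
  intro action client_events device_events _
  unfold Spec_count_recurrences count_recurrences count_recurrences_alt
  exact pv_main (pvKeywords action) (client_events ++ device_events)
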